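-- pv_equiv track=rewrite | github.com/wahhajjaved/large_language_maniacs | downloaded_data/ctssb/cache/onnx-mxnet_7f84f4fe43ce6810f620c45513108c91f85924d1_before.py | _pad_sequence_fix
-- ===== SOURCE A (Python) =====
-- def _pad_sequence_fix(attr, kernelDim):
--     """Changing onnx's pads sequence to match with mxnet's pad_width
--     mxnet: (x1_begin, x1_end, ... , xn_begin, xn_end)
--     onnx: (x1_begin, x2_begin, ... , xn_end, xn_end)"""
--     new_attr = ()
--     if len(attr) % 2 == 0:
--         for index in range(int(len(attr) / 2)):
--             new_attr = new_attr + attr[index::int(len(attr) / 2)]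
--         # Making sure pad values  are in the attr for all axes.
--         while len(new_attr) < kernelDim*2:
--             new_attr = new_attr + (0, 0)
--
--     return new_attr
-- ===== SOURCE B (Python) =====
-- def _pad_sequence_fix(attr, kernelDim):
--     if len(attr) % 2 != 0:
--         return ()
--     half = len(attr) // 2
--     flat = tuple(v for pair in zip(attr[:half], attr[half:]) for v in pair)
--     return flat + (0,) * (2 * max(0, kernelDim - half))
-- ===== Notes on version B (the rewrite author's own statement) =====
-- stated objective: alternative
-- what changed: B replaces A's loop of strided tuple slices (attr[i::len//2] concatenated one by one) with a single zip of the two contiguous halves flattened by a comprehension, and replaces the (0,0)-appending while-loop with one arithmetically sized zero block (0,)*(2*max(0, kernelDim-half)).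
import Mathlib
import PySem

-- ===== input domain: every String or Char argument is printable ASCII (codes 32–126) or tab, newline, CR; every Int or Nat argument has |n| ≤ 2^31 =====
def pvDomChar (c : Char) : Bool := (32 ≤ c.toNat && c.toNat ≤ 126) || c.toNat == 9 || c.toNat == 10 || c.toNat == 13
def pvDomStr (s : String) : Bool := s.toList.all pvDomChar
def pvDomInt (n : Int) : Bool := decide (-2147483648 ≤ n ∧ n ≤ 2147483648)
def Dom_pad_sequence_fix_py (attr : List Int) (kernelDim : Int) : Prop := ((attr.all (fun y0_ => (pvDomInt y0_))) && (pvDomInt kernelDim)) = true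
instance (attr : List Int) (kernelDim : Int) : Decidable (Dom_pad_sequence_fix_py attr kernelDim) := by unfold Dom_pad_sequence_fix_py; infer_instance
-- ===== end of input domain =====

-- B replaces A's strided-slice accumulation loop and its (0,0)-appending while-loop by a
-- zip of the two contiguous halves flattened once plus a single arithmetically sized zero
-- block (objective: alternative decomposition of the same reordering).


-- ===== PORT A =====
-- 'while len(new_attr) < kernelDim*2: new_attr = new_attr + (0, 0)', made total with a
-- fuel counter that only bounds the iteration count ((kernelDim*2).toNat always suffices,
-- since each iteration grows new_attr by 2 and the loop stops at length kernelDim*2).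
def padWhileA (fuel : Nat) (kernelDim : Int) (new_attr : List Int) : List Int :=
  match fuel with
  | 0 => new_attr
  | fuel + 1 =>
    if (new_attr.length : Int) < kernelDim * 2 then
      padWhileA fuel kernelDim (new_attr ++ [0, 0])
    else new_attr

-- 'int(len(attr)/2)' is ported as Int division: len(attr) is even on the branch where it is
-- used, so Python's true division is exact and int() returns exactly len(attr)/2.
-- 'attr[index::step]' is PySem.List.slice?; its step is never 0 where the loop body runs
-- (range(len/2) is empty when len = 0), so .getD [] never supplies the default.
def pad_sequence_fix_py (attr : List Int) (kernelDim : Int) : List Int :=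
  if (attr.length : Int) % 2 == 0 then
    padWhileA (kernelDim * 2).toNat kernelDim
      ((PySem.List.pyRange 0 ((attr.length : Int) / 2) 1).foldl
        (fun new_attr index =>
          new_attr ++
            (PySem.List.slice? attr (some index) none ((attr.length : Int) / 2)).getD [])
        [])
  else []

-- ===== PORT B =====
def pad_sequence_fix_py_alt (attr : List Int) (kernelDim : Int) : List Int :=
  if attr.length % 2 ≠ 0 then []
  else
    ((attr.take (attr.length / 2)).zip (attr.drop (attr.length / 2))).flatMap
        (fun p => [p.1, p.2]) ++
      PySem.List.pyRepeat [0] (2 * max 0 (kernelDim - (attr.length / 2 : Nat)))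

-- ===== PRECONDITION & SPEC =====
def Spec_pad_sequence_fix_py (attr : List Int) (kernelDim : Int) (out : List Int) : Prop := out = pad_sequence_fix_py_alt attr kernelDim
instance (attr : List Int) (kernelDim : Int) (out : List Int) : Decidable (Spec_pad_sequence_fix_py attr kernelDim out) := by unfold Spec_pad_sequence_fix_py; infer_instance

-- ===== CLAIM (what is proved, stated in full; the proofs are below) =====
def Claim_equal_pad_sequence_fix_py : Prop := ∀ (attr : List Int) (kernelDim : Int), Dom_pad_sequence_fix_py attr kernelDim → Spec_pad_sequence_fix_py attr kernelDim (pad_sequence_fix_py attr kernelDim)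

-- ===== LEMMAS AND PROOFS =====

theorem sliceIdx (L i n : Nat) (hi : i < n) (hL : L = 2*n) :
    PySem.List.sliceIndices L (some (i:Int)) none (n:Int) = ((i:Int), (L:Int), (n:Int)) := by
  subst hL
  simp [PySem.List.sliceIndices]
  omega

-- attr[i::n] on a list of length 2n with i < n is the two-element list [attr[i], attr[i+n]]
theorem sliceStride (xs : List Int) (i n : Nat) (h : xs.length = 2*n) (hi : i < n) :
    PySem.List.slice? xs (some (i:Int)) none (n:Int) = some [xs.getD i 0, xs.getD (i+n) 0] := by
  have hn0 : ((n:Int)) ≠ 0 := by exact_mod_cast Nat.pos_of_ne_zero (by omega) |>.ne'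
  have hdiv : (((xs.length:Int)) - i + n - 1) / n = 2 := by
    rw [h]; push_cast
    have h1 : (2*(n:Int)) - i + n - 1 = ((n:Int) - i - 1) + 2*n := by ring
    rw [h1, Int.add_mul_ediv_right _ _ hn0, Int.ediv_eq_zero_of_lt (by omega) (by omega)]
    norm_num
  simp only [PySem.List.slice?, sliceIdx xs.length i n hi h]
  rw [if_neg hn0,
      if_pos (show (0:Int) < (n:Int) by exact_mod_cast Nat.pos_of_ne_zero (by omega)),
      if_pos (show ((i:Int)) < ((xs.length:Int)) by exact_mod_cast (by omega : i < xs.length)),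
      hdiv]
  have ht : (((i:Int)) + ((n:Int)) * ((0:Nat):Int)).toNat = i := by omega
  have ht1 : (((i:Int)) + ((n:Int)) * ((1:Nat):Int)).toNat = i + n := by omega
  norm_num
  rw [show List.range (Int.toNat 2) = [0,1] from rfl]
  simp only [List.filterMap_cons, List.filterMap_nil, ht, ht1,
    List.getElem?_eq_getElem (by omega : i < xs.length),
    List.getElem?_eq_getElem (by omega : i + n < xs.length), Option.getD_some]

-- interleaving two equal-length lists by index equals zip-and-flatten
theorem interleave_eq (xs : List Int) : ∀ (ys : List Int), xs.length = ys.length →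
    (List.range xs.length).flatMap (fun i => [xs.getD i 0, ys.getD i 0])
      = (xs.zip ys).flatMap (fun p => [p.1, p.2]) := by
  induction xs with
  | nil => intro ys h; simp
  | cons x xs ih =>
    intro ys h
    cases ys with
    | nil => simp at h
    | cons y ys =>
      simp only [List.length_cons, List.range_succ_eq_map, List.flatMap_cons,
        List.flatMap_map, List.getD_cons_zero, List.getD_cons_succ, List.zip_cons_cons]
      rw [ih ys (by simpa using h)]

-- the while-loop pads an even-length accumulator with exactly the missing zeros
theorem padWhileA_eq (k : Int) : ∀ (fuel : Nat) (acc : List Int), acc.length % 2 = 0 →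
    (k * 2 - acc.length).toNat ≤ fuel →
    padWhileA fuel k acc = acc ++ List.replicate (2 * (k - (acc.length / 2 : Nat)).toNat) 0 := by
  intro fuel
  induction fuel with
  | zero =>
    intro acc hev hd
    rw [padWhileA]
    have h0 : (2 * (k - (acc.length / 2 : Nat)).toNat) = 0 := by omega
    rw [h0]
    simp
  | succ d ihd =>
    intro acc hev hd
    by_cases hlt : (acc.length : Int) < k * 2
    · rw [padWhileA, if_pos hlt]
      have he2 : (acc ++ [(0:Int), 0]).length % 2 = 0 := by
        simp only [List.length_append, List.length_cons, List.length_nil]; omega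
      have hd2 : (k * 2 - (acc ++ [(0:Int), 0]).length).toNat ≤ d := by
        simp only [List.length_append, List.length_cons, List.length_nil]; omega
      rw [ihd (acc ++ [0, 0]) he2 hd2]
      rw [List.append_assoc]
      congr 1
      rw [show ([ (0:Int), 0] : List Int) = List.replicate 2 0 from rfl,
          List.replicate_append_replicate]
      congr 1
      simp only [List.length_append, List.length_replicate]
      omega
    · rw [padWhileA, if_neg hlt]
      have h0 : (2 * (k - (acc.length / 2 : Nat)).toNat) = 0 := by omega
      rw [h0]
      simp

-- ===== VERDICT (by name: the statement is the Claim_ definition above) =====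
theorem pad_sequence_fix_py_spec : Claim_equal_pad_sequence_fix_py := by
  intro attr k _
  unfold Spec_pad_sequence_fix_py pad_sequence_fix_py pad_sequence_fix_py_alt
  by_cases hpar : attr.length % 2 = 0
  · rw [if_pos (show ((attr.length : Int) % 2 == 0) = true by simp; omega),
        if_neg (by omega : ¬ attr.length % 2 ≠ 0)]
    have h2 : attr.length = 2 * (attr.length / 2) := by omega
    set n : Nat := attr.length / 2 with hn
    have hnInt : (attr.length : Int) / 2 = (n : Int) := by omega
    rw [hnInt]
    -- evaluate the fold of strided slices
    rw [PySem.List.foldl_append_eq_flatMap, List.nil_append, PySem.List.pyRange_one]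
    have hr : ((n : Int) - 0).toNat = n := by omega
    rw [hr, List.flatMap_map]
    have hstep : ∀ (i : Nat), i ∈ List.range n →
        (PySem.List.slice? attr (some ((0:Int) + (i:Int))) none (n:Int)).getD ([] : List Int)
          = [(attr.take n).getD i 0, (attr.drop n).getD i 0] := by
      intro i hi
      have hi' : i < n := List.mem_range.mp hi
      rw [zero_add, sliceStride attr i n h2 hi', Option.getD_some]
      have e1 : (attr.take n).getD i 0 = attr.getD i 0 := by
        rw [List.getD_eq_getElem?_getD, List.getD_eq_getElem?_getD,
            List.getElem?_take_of_lt hi']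
      have e2 : (attr.drop n).getD i 0 = attr.getD (i + n) 0 := by
        rw [List.getD_eq_getElem?_getD, List.getD_eq_getElem?_getD, List.getElem?_drop,
            Nat.add_comm]
      rw [e1, e2]
    rw [List.flatMap_congr hstep]
    have hlt : (attr.take n).length = n := by simp; omega
    have hld : (attr.drop n).length = n := by simp; omega
    have hint := interleave_eq (attr.take n) (attr.drop n) (by omega)
    rw [hlt] at hint
    rw [hint]
    -- evaluate the padding loop
    have hlen : (((attr.take n).zip (attr.drop n)).flatMap (fun p => [p.1, p.2])).length
        = 2 * n := by
      simp [List.length_flatMap, List.length_zip, hlt, hld]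
      omega
    rw [padWhileA_eq k _ _ (by omega) (by omega)]
    congr 1
    rw [PySem.List.pyRepeat_singleton]
    congr 1
    rw [hlen]
    omega
  · rw [if_neg (show ¬ ((attr.length : Int) % 2 == 0) = true by simp; omega),
        if_pos (by omega : attr.length % 2 ≠ 0)]
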